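-- pv_equiv track=rewrite | github.com/MaratAG/GB_Pythons_Algoritms | les_3_task_6.py | get_minmax_index
-- ===== SOURCE A (Python) =====
-- def get_minmax_index(current_list):
--     min_index = max_index = 0
--     for index, value in enumerate(current_list):
--         min_index = index if value < current_list[min_index] else min_index
--         max_index = index if value > current_list[max_index] else max_index
--
--     if min_index > max_index:
--         min_index, max_index = max_index, min_index
--
--     return min_index, max_index
-- ===== SOURCE B (Python) =====
-- def get_minmax_index(current_list):
--     a = current_list.index(min(current_list))
--     b = current_list.index(max(current_list))
--     return (a, b) if a <= b else (b, a)
-- ===== Notes on version B (the rewrite author's own statement) =====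
-- stated objective: idiomatic
-- what changed: Replaces A's single index-tracking loop over enumerate with built-in min/max value scans plus list.index first-occurrence lookups, then orders the two indices.
-- outside the precondition, e.g. on get_minmax_index([]): A returns (0, 0), B raises ValueError
import Mathlib
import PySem

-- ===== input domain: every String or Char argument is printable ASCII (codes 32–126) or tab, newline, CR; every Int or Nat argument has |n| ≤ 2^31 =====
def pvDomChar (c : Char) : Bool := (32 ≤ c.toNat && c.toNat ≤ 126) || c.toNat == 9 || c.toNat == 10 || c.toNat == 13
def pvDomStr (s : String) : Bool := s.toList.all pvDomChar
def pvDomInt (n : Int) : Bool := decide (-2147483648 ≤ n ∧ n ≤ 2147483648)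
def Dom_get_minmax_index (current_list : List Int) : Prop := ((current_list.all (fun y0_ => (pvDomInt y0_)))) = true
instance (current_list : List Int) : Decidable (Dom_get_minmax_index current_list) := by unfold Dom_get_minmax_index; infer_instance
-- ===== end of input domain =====

-- B replaces A's index-tracking loop by min/max value scans plus first-occurrence index lookups (objective: idiomatic).

-- ===== PORT A =====
-- current_list[min_index] / current_list[max_index]: the tracked indices are always in range
-- (they start at 0 and are only ever set to enumerate indices), so pyGetD with default 0 is exact here.
def get_minmax_index (current_list : List Int) : Int × Int :=
  let s := (PySem.List.enumerate current_list 0).foldl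
    (fun (s : Int × Int) (p : Int × Int) =>
      (if p.2 < PySem.List.pyGetD current_list s.1 0 then p.1 else s.1,
       if p.2 > PySem.List.pyGetD current_list s.2 0 then p.1 else s.2))
    (0, 0)
  if s.1 > s.2 then (s.2, s.1) else s

-- ===== PORT B =====
def get_minmax_index_alt (current_list : List Int) : Int × Int :=
  match PySem.List.min? current_list (fun x => x), PySem.List.max? current_list (fun x => x) with
  | some lo, some hi =>
    match PySem.List.index? current_list lo, PySem.List.index? current_list hi with
    | some a, some b => if (a : Int) ≤ (b : Int) then ((a : Int), (b : Int)) else ((b : Int), (a : Int))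
    | _, _ => (0, 0)   -- unreachable: lo/hi are members of the list
  | _, _ => (0, 0)     -- empty list: Python B raises ValueError here (excluded by Pre_)

-- ===== PRECONDITION & SPEC =====
-- Pre_ excludes only the empty list, on which B's min()/max() raise ValueError while A
-- returns (0, 0) from its never-updated initial indices.
def Pre_get_minmax_index (current_list : List Int) : Prop := current_list ≠ []
instance (current_list : List Int) : Decidable (Pre_get_minmax_index current_list) := by unfold Pre_get_minmax_index; infer_instance
def pvWitness_get_minmax_index : List Int := [3, -1, 4, -1, 5]

def Spec_get_minmax_index (current_list : List Int) (out : Int × Int) : Prop := out = get_minmax_index_alt current_list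
instance (current_list : List Int) (out : Int × Int) : Decidable (Spec_get_minmax_index current_list out) := by unfold Spec_get_minmax_index; infer_instance

-- ===== CLAIM (what is proved, stated in full; the proofs are below) =====
def Claim_equal_get_minmax_index : Prop := ∀ (current_list : List Int), Dom_get_minmax_index current_list → Pre_get_minmax_index current_list → Spec_get_minmax_index current_list (get_minmax_index current_list)

-- ===== LEMMAS AND PROOFS =====

-- minimum / maximum of a nonempty list, as the running fold Python's min/max compute
def myMin (x : Int) (t : List Int) : Int := t.foldl min x
def myMax (x : Int) (t : List Int) : Int := t.foldl max x

-- first index of the minimum / maximum of x :: t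
def fm (x : Int) (t : List Int) : Nat := ((PySem.List.index? (x :: t) (myMin x t)).getD 0)
def fM (x : Int) (t : List Int) : Nat := ((PySem.List.index? (x :: t) (myMax x t)).getD 0)

lemma myMin_mem (x : Int) (t : List Int) : myMin x t ∈ x :: t := by
  rcases PySem.List.foldl_min_mem t x with h | h
  · rw [myMin, h]; exact List.mem_cons_self
  · exact List.mem_cons_of_mem _ h

lemma myMax_mem (x : Int) (t : List Int) : myMax x t ∈ x :: t := by
  rcases PySem.List.foldl_max_mem t x with h | h
  · rw [myMax, h]; exact List.mem_cons_self
  · exact List.mem_cons_of_mem _ h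

lemma myMin_le (x : Int) (t : List Int) : ∀ z ∈ x :: t, myMin x t ≤ z := by
  intro z hz
  rcases List.mem_cons.mp hz with rfl | hz
  · exact (PySem.List.foldl_min_le t z).1
  · exact (PySem.List.foldl_min_le t x).2 z hz

lemma le_myMax (x : Int) (t : List Int) : ∀ z ∈ x :: t, z ≤ myMax x t := by
  intro z hz
  rcases List.mem_cons.mp hz with rfl | hz
  · exact (PySem.List.le_foldl_max t z).1
  · exact (PySem.List.le_foldl_max t x).2 z hz

-- looking up the tracked index in any extension of the list returns the tracked value
lemma lookup_fm (x : Int) (t ext : List Int) :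
    PySem.List.pyGetD ((x :: t) ++ ext) ((fm x t : Nat) : Int) 0 = myMin x t := by
  have h : (PySem.List.index? (x :: t) (myMin x t)).isSome :=
    (PySem.List.index?_isSome_iff _ _).mpr (myMin_mem x t)
  rcases Option.isSome_iff_exists.mp h with ⟨k, hk⟩
  rcases PySem.List.getElem_of_index?_eq_some hk with ⟨hlt, hval, _⟩
  have hk' : fm x t = k := by simp only [fm, hk, Option.getD_some]
  rw [hk', PySem.List.pyGetD_natCast]
  rw [List.getD_eq_getElem?_getD, List.getElem?_append_left (by omega)]
  simp [List.getElem?_eq_getElem hlt, hval]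

lemma lookup_fM (x : Int) (t ext : List Int) :
    PySem.List.pyGetD ((x :: t) ++ ext) ((fM x t : Nat) : Int) 0 = myMax x t := by
  have h : (PySem.List.index? (x :: t) (myMax x t)).isSome :=
    (PySem.List.index?_isSome_iff _ _).mpr (myMax_mem x t)
  rcases Option.isSome_iff_exists.mp h with ⟨k, hk⟩
  rcases PySem.List.getElem_of_index?_eq_some hk with ⟨hlt, hval, _⟩
  have hk' : fM x t = k := by simp only [fM, hk, Option.getD_some]
  rw [hk', PySem.List.pyGetD_natCast]
  rw [List.getD_eq_getElem?_getD, List.getElem?_append_left (by omega)]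
  simp [List.getElem?_eq_getElem hlt, hval]

-- A's loop body, over the full list L
def stepf (L : List Int) : (Int × Int) → (Int × Int) → (Int × Int) :=
  fun s p =>
    (if p.2 < PySem.List.pyGetD L s.1 0 then p.1 else s.1,
     if p.2 > PySem.List.pyGetD L s.2 0 then p.1 else s.2)

-- the core invariant: A's loop over x :: t (with lookups into any extension) lands on the
-- first indices of the minimum and the maximum
lemma loopA_spec (t : List Int) (x : Int) : ∀ ext : List Int,
    (PySem.List.enumerate (x :: t) 0).foldl (stepf ((x :: t) ++ ext)) (0, 0)
      = (((fm x t : Nat) : Int), ((fM x t : Nat) : Int)) := by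
  induction t using List.reverseRecOn with
  | nil =>
    intro ext
    simp [PySem.List.enumerate_cons, PySem.List.enumerate_nil, stepf, fm, fM, myMin, myMax]
  | append_singleton t' y ih =>
    intro ext
    have hl : (x :: (t' ++ [y])) = (x :: t') ++ [y] := by simp
    rw [hl, PySem.List.enumerate_append, List.foldl_append]
    have hext : ((x :: t') ++ [y]) ++ ext = (x :: t') ++ ([y] ++ ext) := by simp
    rw [hext, ih ([y] ++ ext)]
    have hfm := lookup_fm x t' ([y] ++ ext)
    have hfM := lookup_fM x t' ([y] ++ ext)
    simp only [PySem.List.enumerate_cons, PySem.List.enumerate_nil, List.foldl_cons,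
      List.foldl_nil, stepf, hfm, hfM]
    have hminapp : myMin x (t' ++ [y]) = min (myMin x t') y := by
      simp [myMin, List.foldl_append]
    have hmaxapp : myMax x (t' ++ [y]) = max (myMax x t') y := by
      simp [myMax, List.foldl_append]
    simp only [Prod.mk.injEq]
    constructor
    · -- min component
      by_cases hy : y < myMin x t'
      · rw [if_pos hy]
        have hmin : myMin x (t' ++ [y]) = y := by rw [hminapp]; omega
        have hnotmem : y ∉ (x :: t') := fun hmem => absurd (myMin_le x t' y hmem) (by omega)
        have hidx : PySem.List.index? ((x :: t') ++ [y]) y = some (x :: t').length :=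
          PySem.List.index?_append_singleton_self (x :: t') y hnotmem
        simp only [fm, hmin, List.cons_append] at hidx ⊢
        rw [hidx]
        simp
      · rw [if_neg hy]
        have hmin : myMin x (t' ++ [y]) = myMin x t' := by rw [hminapp]; omega
        have hidx : PySem.List.index? ((x :: t') ++ [y]) (myMin x t') = PySem.List.index? (x :: t') (myMin x t') :=
          PySem.List.index?_append_of_mem [y] (myMin_mem x t')
        simp only [fm, hmin, List.cons_append] at hidx ⊢
        rw [hidx]
    · -- max component
      by_cases hy : y > myMax x t'
      · rw [if_pos hy]
        have hmax : myMax x (t' ++ [y]) = y := by rw [hmaxapp]; omega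
        have hnotmem : y ∉ (x :: t') := fun hmem => absurd (le_myMax x t' y hmem) (by omega)
        have hidx : PySem.List.index? ((x :: t') ++ [y]) y = some (x :: t').length :=
          PySem.List.index?_append_singleton_self (x :: t') y hnotmem
        simp only [fM, hmax, List.cons_append] at hidx ⊢
        rw [hidx]
        simp
      · rw [if_neg hy]
        have hmax : myMax x (t' ++ [y]) = myMax x t' := by rw [hmaxapp]; omega
        have hidx : PySem.List.index? ((x :: t') ++ [y]) (myMax x t') = PySem.List.index? (x :: t') (myMax x t') :=
          PySem.List.index?_append_of_mem [y] (myMax_mem x t')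
        simp only [fM, hmax, List.cons_append] at hidx ⊢
        rw [hidx]

-- B's port computes the same two indices
lemma alt_eq (x : Int) (t : List Int) :
    get_minmax_index_alt (x :: t)
      = if ((fm x t : Nat) : Int) ≤ ((fM x t : Nat) : Int)
        then (((fm x t : Nat) : Int), ((fM x t : Nat) : Int))
        else (((fM x t : Nat) : Int), ((fm x t : Nat) : Int)) := by
  have hmin : PySem.List.min? (x :: t) (fun y => y) = some (myMin x t) := by
    simpa [myMin] using PySem.List.min?_id_cons x t
  have hmax : PySem.List.max? (x :: t) (fun y => y) = some (myMax x t) := by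
    simpa [myMax] using PySem.List.max?_id_cons x t
  have ha : (PySem.List.index? (x :: t) (myMin x t)).isSome :=
    (PySem.List.index?_isSome_iff _ _).mpr (myMin_mem x t)
  have hb : (PySem.List.index? (x :: t) (myMax x t)).isSome :=
    (PySem.List.index?_isSome_iff _ _).mpr (myMax_mem x t)
  rcases Option.isSome_iff_exists.mp ha with ⟨a, hA⟩
  rcases Option.isSome_iff_exists.mp hb with ⟨b, hB⟩
  have hfa : fm x t = a := by simp only [fm, hA, Option.getD_some]
  have hfb : fM x t = b := by simp only [fM, hB, Option.getD_some]
  simp only [get_minmax_index_alt, hmin, hmax, hA, hB, hfa, hfb]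

-- ===== VERDICT (by name: the statement is the Claim_ definition above) =====
theorem get_minmax_index_spec : Claim_equal_get_minmax_index := by
  intro l _ hpre
  match l with
  | [] => exact absurd rfl hpre
  | x :: t =>
    show get_minmax_index (x :: t) = get_minmax_index_alt (x :: t)
    have hloop := loopA_spec t x []
    simp only [List.append_nil] at hloop
    rw [alt_eq]
    unfold get_minmax_index
    rw [show (fun (s : Int × Int) (p : Int × Int) =>
          (if p.2 < PySem.List.pyGetD (x :: t) s.1 0 then p.1 else s.1,
           if p.2 > PySem.List.pyGetD (x :: t) s.2 0 then p.1 else s.2)) = stepf (x :: t) from rfl]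
    rw [hloop]
    by_cases h : ((fm x t : Nat) : Int) ≤ ((fM x t : Nat) : Int)
    · simp [h, show ¬ ((fm x t : Nat) : Int) > ((fM x t : Nat) : Int) by omega]
    · simp [h, show ((fm x t : Nat) : Int) > ((fM x t : Nat) : Int) by omega]
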